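-- pv_equiv track=rewrite | github.com/cakebaker/diffutils | util/compare_test_results.py | extract_test_results
-- ===== SOURCE A (Python) =====
-- def extract_test_results(json_data):
--     """Extract test results from a diffutils test-results.json.
--
--     Note: unlike sed, diffutils JSON has no 'summary' object — results are
--     computed from the 'tests' array using the 'result' and 'test' fields.
--     """
--     tests = json_data.get("tests", [])
--     passed  = sum(1 for t in tests if t.get("result") == "PASS")
--     failed  = sum(1 for t in tests if t.get("result") == "FAIL")
--     skipped = sum(1 for t in tests if t.get("result") == "SKIP")
--     summary = {"total": len(tests), "passed": passed, "failed": failed, "skipped": skipped}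
--     failed_tests = [t["test"] for t in tests if t.get("result") == "FAIL"]
--     return summary, failed_tests
-- ===== SOURCE B (Python) =====
-- def extract_test_results(json_data):
--     """Single pass over the tests instead of four scans."""
--     tests = json_data.get("tests", [])
--     passed = failed = skipped = 0
--     failed_tests = []
--     for t in tests:
--         r = t.get("result")
--         if r == "PASS":
--             passed += 1
--         elif r == "FAIL":
--             failed += 1
--             failed_tests.append(t["test"])
--         elif r == "SKIP":
--             skipped += 1
--     summary = {"total": len(tests), "passed": passed,
--                "failed": failed, "skipped": skipped}
--     return summary, failed_tests
-- ===== Notes on version B (the rewrite author's own statement) =====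
-- stated objective: alternative
-- what changed: Replaces A's four separate scans over the tests list (three counting generator expressions plus a filtering list comprehension) by one loop that maintains the three counters and the failed-test list together.
import Mathlib
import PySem

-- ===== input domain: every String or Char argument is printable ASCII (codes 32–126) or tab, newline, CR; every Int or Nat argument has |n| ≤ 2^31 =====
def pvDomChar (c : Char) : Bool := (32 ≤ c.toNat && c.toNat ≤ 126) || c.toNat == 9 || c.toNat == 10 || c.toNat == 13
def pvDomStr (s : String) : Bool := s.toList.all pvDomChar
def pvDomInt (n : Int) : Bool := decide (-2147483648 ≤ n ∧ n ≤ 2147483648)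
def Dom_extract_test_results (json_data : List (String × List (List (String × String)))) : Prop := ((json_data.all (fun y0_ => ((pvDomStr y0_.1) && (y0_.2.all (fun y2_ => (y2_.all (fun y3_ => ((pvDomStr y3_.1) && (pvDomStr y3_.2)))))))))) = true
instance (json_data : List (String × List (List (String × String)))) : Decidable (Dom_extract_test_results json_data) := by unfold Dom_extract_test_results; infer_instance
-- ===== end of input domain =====

-- B replaces A's four separate scans over the tests list by one accumulating loop (return value only).

-- ===== PORT A =====
def extract_test_results (json_data : List (String × List (List (String × String)))) : (List (String × Int)) × List String :=
  let tests := (PySem.Dict.mk json_data).getD "tests" []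
  let passed : Int := (tests.filter (fun t => (PySem.Dict.mk t).get? "result" == some "PASS")).length
  let failed : Int := (tests.filter (fun t => (PySem.Dict.mk t).get? "result" == some "FAIL")).length
  let skipped : Int := (tests.filter (fun t => (PySem.Dict.mk t).get? "result" == some "SKIP")).length
  let summary : List (String × Int) :=
    [("total", (tests.length : Int)), ("passed", passed), ("failed", failed), ("skipped", skipped)]
  -- t["test"]: KeyError (= none) is excluded by Pre_; .getD "" is unreachable under Pre_
  let failed_tests := (tests.filter (fun t => (PySem.Dict.mk t).get? "result" == some "FAIL")).map
    (fun t => ((PySem.Dict.mk t).get? "test").getD "")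
  (summary, failed_tests)

-- ===== PORT B =====
def etrStep (s : Int × Int × Int × List String) (t : List (String × String)) :
    Int × Int × Int × List String :=
  let r := (PySem.Dict.mk t).get? "result"
  if r == some "PASS" then (s.1 + 1, s.2.1, s.2.2.1, s.2.2.2)
  else if r == some "FAIL" then
    (s.1, s.2.1 + 1, s.2.2.1, s.2.2.2 ++ [((PySem.Dict.mk t).get? "test").getD ""])
  else if r == some "SKIP" then (s.1, s.2.1, s.2.2.1 + 1, s.2.2.2)
  else s

def extract_test_results_alt (json_data : List (String × List (List (String × String)))) : (List (String × Int)) × List String :=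
  let tests := (PySem.Dict.mk json_data).getD "tests" []
  let st := tests.foldl etrStep (0, 0, 0, [])
  ([("total", (tests.length : Int)), ("passed", st.1), ("failed", st.2.1), ("skipped", st.2.2.1)],
   st.2.2.2)

-- ===== PRECONDITION & SPEC =====
-- Pre_ excludes exactly the inputs on which Python A raises KeyError: a test dict whose
-- "result" is "FAIL" but which has no "test" key (A's t["test"]; B raises there too).
def Pre_extract_test_results (json_data : List (String × List (List (String × String)))) : Prop :=
  ∀ t ∈ (PySem.Dict.mk json_data).getD "tests" [],
    (PySem.Dict.mk t).get? "result" = some "FAIL" → ((PySem.Dict.mk t).get? "test").isSome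
instance (json_data : List (String × List (List (String × String)))) : Decidable (Pre_extract_test_results json_data) := by unfold Pre_extract_test_results; infer_instance
def pvWitness_extract_test_results : (List (String × List (List (String × String)))) :=
  [("tests", [[("result", "PASS")], [("result", "FAIL"), ("test", "t1")], [("result", "SKIP")]])]
def Spec_extract_test_results (json_data : List (String × List (List (String × String)))) (out : (List (String × Int)) × List String) : Prop := out = extract_test_results_alt json_data
instance (json_data : List (String × List (List (String × String)))) (out : (List (String × Int)) × List String) : Decidable (Spec_extract_test_results json_data out) := by unfold Spec_extract_test_results; infer_instance

-- ===== CLAIM (what is proved, stated in full; the proofs are below) =====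
def Claim_equal_extract_test_results : Prop := ∀ (json_data : List (String × List (List (String × String)))), Dom_extract_test_results json_data → Pre_extract_test_results json_data → Spec_extract_test_results json_data (extract_test_results json_data)

-- ===== LEMMAS AND PROOFS =====

-- loop invariant: the single fold computes the three counts and the failed-name list at once
theorem etr_fold (tests : List (List (String × String))) :
    ∀ p f s acc, tests.foldl etrStep (p, f, s, acc) =
      (p + (tests.filter (fun t => (PySem.Dict.mk t).get? "result" == some "PASS")).length,
       f + (tests.filter (fun t => (PySem.Dict.mk t).get? "result" == some "FAIL")).length,
       s + (tests.filter (fun t => (PySem.Dict.mk t).get? "result" == some "SKIP")).length,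
       acc ++ (tests.filter (fun t => (PySem.Dict.mk t).get? "result" == some "FAIL")).map
         (fun t => ((PySem.Dict.mk t).get? "test").getD "")) := by
  induction tests with
  | nil => intro p f s acc; simp
  | cons t ts ih =>
    intro p f s acc
    simp only [List.foldl_cons]
    by_cases hP : (PySem.Dict.mk t).get? "result" == some "PASS"
    · have hF : ((PySem.Dict.mk t).get? "result" == some "FAIL") = false := by
        revert hP; cases h : (PySem.Dict.mk t).get? "result" <;> simp_all
      have hS : ((PySem.Dict.mk t).get? "result" == some "SKIP") = false := by
        revert hP; cases h : (PySem.Dict.mk t).get? "result" <;> simp_all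
      simp [etrStep, hP, hF, hS, ih]
      omega
    · by_cases hF : (PySem.Dict.mk t).get? "result" == some "FAIL"
      · have hS : ((PySem.Dict.mk t).get? "result" == some "SKIP") = false := by
          revert hF; cases h : (PySem.Dict.mk t).get? "result" <;> simp_all
        simp [etrStep, hP, hF, hS, ih]
        omega
      · by_cases hS : (PySem.Dict.mk t).get? "result" == some "SKIP"
        · simp [etrStep, hP, hF, hS, ih]
          omega
        · simp [etrStep, hP, hF, hS, ih]

-- ===== VERDICT (by name: the statement is the Claim_ definition above) =====
theorem extract_test_results_spec : Claim_equal_extract_test_results := by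
  intro json_data _ _
  unfold Spec_extract_test_results extract_test_results extract_test_results_alt
  simp [etr_fold]
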